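-- pv_equiv track=rewrite | github.com/TorMatzAndren/Jarri-Benchmark | benchmark/cli/jarri_benchmark_failure_aggregate.py | build_subtype_distribution
-- ===== SOURCE A (Python) =====
-- from collections import Counter, defaultdict
-- from typing import Any
--
-- def normalize_text(value: Any, default: str = "") -> str:
--     if value is None:
--         return default
--     if isinstance(value, str):
--         return value.strip()
--     return str(value).strip()
--
-- def counter_to_sorted_dict(counter: Counter) -> dict[str, int]:
--     return {k: counter[k] for k in sorted(counter.keys(), key=lambda x: str(x))}
--
-- def build_subtype_distribution(records: list[dict[str, Any]]) -> dict[str, int]: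
--     counter = Counter()
--     for record in records:
--         subtypes = record.get("failure_subtypes") or []
--         if not subtypes:
--             counter["none"] += 1
--         else:
--             for subtype in subtypes:
--                 counter[normalize_text(subtype, "unknown")] += 1
--     return counter_to_sorted_dict(counter)
-- ===== SOURCE B (Python) =====
-- from itertools import groupby
-- from typing import Any
--
--
-- def normalize_text(value: Any, default: str = "") -> str:
--     if value is None:
--         return default
--     if isinstance(value, str):
--         return value.strip()
--     return str(value).strip()
--
--
-- def _labels(record: dict) -> list[str]:
--     subtypes = record.get("failure_subtypes") or []
--     return [normalize_text(s, "unknown") for s in subtypes] or ["none"]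
--
--
-- def build_subtype_distribution(records: list[dict[str, Any]]) -> dict[str, int]:
--     flat = sorted(label for record in records for label in _labels(record))
--     return {label: len(list(group)) for label, group in groupby(flat)}
-- ===== Notes on version B (the rewrite author's own statement) =====
-- stated objective: alternative
-- what changed: Replaces the Counter increment loop plus separate key-sort with flatten-all-labels, sort once, and count consecutive runs via itertools.groupby.
import Mathlib
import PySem

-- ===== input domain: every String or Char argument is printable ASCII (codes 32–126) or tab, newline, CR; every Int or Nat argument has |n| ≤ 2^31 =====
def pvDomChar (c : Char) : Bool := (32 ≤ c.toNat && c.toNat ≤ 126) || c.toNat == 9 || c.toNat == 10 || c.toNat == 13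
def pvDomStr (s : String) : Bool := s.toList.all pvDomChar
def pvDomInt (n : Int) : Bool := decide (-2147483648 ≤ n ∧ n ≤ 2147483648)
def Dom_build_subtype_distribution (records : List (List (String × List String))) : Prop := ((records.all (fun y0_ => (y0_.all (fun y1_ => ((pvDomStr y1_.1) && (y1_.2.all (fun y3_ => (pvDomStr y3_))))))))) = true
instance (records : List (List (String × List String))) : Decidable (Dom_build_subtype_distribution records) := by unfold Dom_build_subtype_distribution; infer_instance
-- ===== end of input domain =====

-- B replaces A's Counter-increment loop + separate key sort by flatten / sort once / count
-- consecutive runs (groupby); same return value, proved equal on all inputs (objective: alternative).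

-- ===== PORT A =====
-- normalize_text: on our typed domain value is always a str, so this is value.strip() (exact);
-- the None / non-str branches are unreachable under the type convention.
def normalize_text (value : String) (default : String) : String :=
  let _ := default
  PySem.Str.strip value

def counter_to_sorted_dict (counter : PySem.Dict String Int) : List (String × Int) :=
  (PySem.List.sorted counter.keys (fun x => x) false).map (fun k => (k, counter.getD k 0))

def build_subtype_distribution (records : List (List (String × List String))) : List (String × Int) :=
  let counter := records.foldl
    (fun c record =>
      let subtypes := (PySem.Dict.mk record).getD "failure_subtypes" []
      if subtypes.isEmpty then
        c.modify "none" 0 (· + 1)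
      else
        subtypes.foldl (fun c2 subtype => c2.modify (normalize_text subtype "unknown") 0 (· + 1)) c)
    PySem.Dict.empty
  counter_to_sorted_dict counter

-- ===== PORT B =====
def pyLabels (record : List (String × List String)) : List String :=
  let subtypes := (PySem.Dict.mk record).getD "failure_subtypes" []
  let ls := subtypes.map (fun s => normalize_text s "unknown")
  if ls.isEmpty then ["none"] else ls

-- itertools.groupby on the sorted list: take each leading run, emit (label, run length)
def groupCounts : List String → List (String × Int)
  | [] => []
  | x :: xs =>
      (x, 1 + (xs.takeWhile (· == x)).length) :: groupCounts (xs.dropWhile (· == x))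
  termination_by s => s.length
  decreasing_by
    have := List.length_dropWhile_le (· == x) xs
    simp only [List.length_cons]
    omega

def build_subtype_distribution_alt (records : List (List (String × List String))) : List (String × Int) :=
  groupCounts (PySem.List.sorted (records.flatMap pyLabels) (fun x => x) false)

-- ===== PRECONDITION & SPEC =====
def Spec_build_subtype_distribution (records : List (List (String × List String))) (out : List (String × Int)) : Prop := out = build_subtype_distribution_alt records
instance (records : List (List (String × List String))) (out : List (String × Int)) : Decidable (Spec_build_subtype_distribution records out) := by unfold Spec_build_subtype_distribution; infer_instance

-- ===== CLAIM (what is proved, stated in full; the proofs are below) =====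
def Claim_equal_build_subtype_distribution : Prop := ∀ (records : List (List (String × List String))), Dom_build_subtype_distribution records → Spec_build_subtype_distribution records (build_subtype_distribution records)

-- ===== LEMMAS AND PROOFS =====

-- the run keys groupby visits, in order
def runKeys : List String → List String
  | [] => []
  | x :: xs => x :: runKeys (xs.dropWhile (· == x))
  termination_by s => s.length
  decreasing_by
    have := List.length_dropWhile_le (· == x) xs
    simp only [List.length_cons]
    omega

theorem mem_runKeys {s : List String} {k : String} (h : k ∈ runKeys s) : k ∈ s := by
  induction s using runKeys.induct with
  | case1 => rw [runKeys] at h; exact absurd h (List.not_mem_nil)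
  | case2 x xs ih =>
      rw [runKeys] at h
      rcases List.mem_cons.mp h with rfl | h
      · exact List.mem_cons_self
      · exact List.mem_cons_of_mem _ ((List.dropWhile_sublist _).mem (ih h))

theorem not_mem_dropWhile_sorted {x : String} {xs : List String}
    (h : (x :: xs).Pairwise (· ≤ ·)) : x ∉ xs.dropWhile (· == x) := by
  intro hm
  rcases hd : xs.dropWhile (· == x) with _ | ⟨y, t⟩
  · simp [hd] at hm
  · have hne : xs.dropWhile (· == x) ≠ [] := by simp [hd]
    have hy := List.head_dropWhile_not (· == x) hne
    simp only [hd, List.head_cons] at hy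
    have hyx : y ≠ x := by simpa using hy
    rw [hd] at hm
    rcases List.mem_cons.mp hm with rfl | hm
    · exact hyx rfl
    · have hsub : (y :: t).Sublist xs := hd ▸ List.dropWhile_sublist _
      have hpw : (y :: t).Pairwise (· ≤ ·) := (List.pairwise_cons.mp h).2.sublist hsub
      have h1 : y ≤ x := (List.pairwise_cons.mp hpw).1 x hm
      have h2 : x ≤ y := (List.pairwise_cons.mp h).1 y (hsub.mem List.mem_cons_self)
      exact hyx (le_antisymm h1 h2)

theorem runKeys_pairwise_lt {s : List String} (h : s.Pairwise (· ≤ ·)) :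
    (runKeys s).Pairwise (· < ·) := by
  induction s using runKeys.induct with
  | case1 => simp [runKeys]
  | case2 x xs ih =>
      rw [runKeys]
      have hsub : (xs.dropWhile (· == x)).Sublist xs := List.dropWhile_sublist _
      have hpw : (xs.dropWhile (· == x)).Pairwise (· ≤ ·) :=
        (List.pairwise_cons.mp h).2.sublist hsub
      refine List.pairwise_cons.mpr ⟨?_, ih hpw⟩
      intro k hk
      have hkd : k ∈ xs.dropWhile (· == x) := mem_runKeys hk
      have hle : x ≤ k := (List.pairwise_cons.mp h).1 k (hsub.mem hkd)
      have hne : x ≠ k := fun he => not_mem_dropWhile_sorted h (he ▸ hkd)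
      exact lt_of_le_of_ne hle hne

theorem mem_runKeys_of_mem {s : List String} {k : String} (h : s.Pairwise (· ≤ ·))
    (hk : k ∈ s) : k ∈ runKeys s := by
  induction s using runKeys.induct with
  | case1 => simp at hk
  | case2 x xs ih =>
      rw [runKeys]
      rcases List.mem_cons.mp hk with rfl | hk
      · exact List.mem_cons_self
      · by_cases hkx : k = x
        · exact hkx ▸ List.mem_cons_self
        · apply List.mem_cons_of_mem
          have hpw : (xs.dropWhile (· == x)).Pairwise (· ≤ ·) :=
            (List.pairwise_cons.mp h).2.sublist (List.dropWhile_sublist _)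
          apply ih hpw
          have hxs : xs = xs.takeWhile (· == x) ++ xs.dropWhile (· == x) :=
            (List.takeWhile_append_dropWhile).symm
          rcases List.mem_append.mp (hxs ▸ hk) with ht | hd
          · exact absurd (by simpa using List.mem_takeWhile_imp ht) hkx
          · exact hd

theorem count_takeWhile_eq {x : String} (xs : List String) :
    (xs.takeWhile (· == x)).count x = (xs.takeWhile (· == x)).length := by
  apply List.count_eq_length.mpr
  intro a ha
  have h2 : a = x := by simpa using List.mem_takeWhile_imp ha
  simp [h2]

theorem count_takeWhile_ne {x k : String} (xs : List String) (hkx : k ≠ x) :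
    (xs.takeWhile (· == x)).count k = 0 := by
  apply List.count_eq_zero.mpr
  intro hm
  exact hkx (by simpa using List.mem_takeWhile_imp hm)

theorem groupCounts_eq_map {s : List String} (h : s.Pairwise (· ≤ ·)) :
    groupCounts s = (runKeys s).map (fun k => (k, (s.count k : Int))) := by
  induction s using runKeys.induct with
  | case1 => simp [groupCounts, runKeys]
  | case2 x xs ih =>
      rw [groupCounts, runKeys]
      have hxs : xs = xs.takeWhile (· == x) ++ xs.dropWhile (· == x) :=
        (List.takeWhile_append_dropWhile).symm
      have hpw : (xs.dropWhile (· == x)).Pairwise (· ≤ ·) :=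
        (List.pairwise_cons.mp h).2.sublist (List.dropWhile_sublist _)
      have hxnot : x ∉ xs.dropWhile (· == x) := not_mem_dropWhile_sorted h
      simp only [List.map_cons]
      congr 1
      · -- head: count of x
        have hcx : (x :: xs).count x
            = 1 + (xs.takeWhile (· == x)).length := by
          rw [List.count_cons_self]
          conv_lhs => rw [hxs]
          rw [List.count_append, count_takeWhile_eq, List.count_eq_zero.mpr hxnot]
          omega
        simp only [Prod.mk.injEq]
        refine ⟨trivial, ?_⟩
        rw [hcx]
        push_cast
        ring
      · -- tail
        rw [ih hpw]
        apply List.map_congr_left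
        intro k hk
        have hkd : k ∈ xs.dropWhile (· == x) := mem_runKeys hk
        have hkx : k ≠ x := fun he => hxnot (he ▸ hkd)
        have : (x :: xs).count k = (xs.dropWhile (· == x)).count k := by
          rw [List.count_cons_of_ne (Ne.symm hkx)]
          conv_lhs => rw [hxs]
          rw [List.count_append, count_takeWhile_ne _ hkx]
          omega
        simp [this]

theorem stepA_eq (d : PySem.Dict String Int) (record : List (String × List String)) :
    (let subtypes := (PySem.Dict.mk record).getD "failure_subtypes" []
     if subtypes.isEmpty then
       d.modify "none" 0 (· + 1)
     else
       subtypes.foldl (fun c2 subtype => c2.modify (normalize_text subtype "unknown") 0 (· + 1)) d)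
    = (pyLabels record).foldl (fun c x => c.modify x 0 (· + 1)) d := by
  simp only [pyLabels, List.isEmpty_map]
  cases hs : ((PySem.Dict.mk record).getD "failure_subtypes" []).isEmpty with
  | true => simp
  | false => simp [List.foldl_map]

theorem foldA_eq_counter (records : List (List (String × List String))) :
    records.foldl
      (fun c record =>
        let subtypes := (PySem.Dict.mk record).getD "failure_subtypes" []
        if subtypes.isEmpty then
          c.modify "none" 0 (· + 1)
        else
          subtypes.foldl (fun c2 subtype => c2.modify (normalize_text subtype "unknown") 0 (· + 1)) c)
      PySem.Dict.empty
    = PySem.Dict.counter (records.flatMap pyLabels) := by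
  rw [PySem.Dict.counter_eq_foldl]
  generalize PySem.Dict.empty = d
  induction records generalizing d with
  | nil => simp
  | cons r rs ih =>
      rw [List.foldl_cons, List.flatMap_cons, List.foldl_append, ih, stepA_eq]

-- ===== VERDICT (by name: the statement is the Claim_ definition above) =====
theorem build_subtype_distribution_spec : Claim_equal_build_subtype_distribution := by
  intro records _
  show build_subtype_distribution records = build_subtype_distribution_alt records
  simp only [build_subtype_distribution, build_subtype_distribution_alt,
    counter_to_sorted_dict, foldA_eq_counter]
  set labels := records.flatMap pyLabels with hlab
  set ss := PySem.List.sorted labels (fun x => x) false with hss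
  have hsp : ss.Pairwise (· ≤ ·) := by
    simpa using PySem.List.sorted_pairwise (xs := labels) (key := fun x => x)
  have hperm : ss.Perm labels := PySem.List.sorted_perm labels _ _
  have hkeys : PySem.List.sorted (PySem.Dict.counter labels).keys (fun x => x) false
      = runKeys ss := by
    rw [PySem.Dict.keys_counter]
    apply PySem.List.sorted_eq_of_perm_of_pairwise_lt
    · apply (List.perm_ext_iff_of_nodup ?_ ?_).mpr
      · intro a
        constructor
        · intro ha
          exact (PySem.Set.mem_ofList _ _).mpr (hperm.mem_iff.mp (mem_runKeys ha))
        · intro ha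
          exact mem_runKeys_of_mem hsp (hperm.mem_iff.mpr ((PySem.Set.mem_ofList _ _).mp ha))
      · exact (runKeys_pairwise_lt hsp).nodup
      · exact PySem.Set.nodup_ofList _
    · simpa using runKeys_pairwise_lt hsp
  rw [hkeys, groupCounts_eq_map hsp]
  apply List.map_congr_left
  intro k hk
  rw [PySem.Dict.getD_counter, hperm.count_eq]
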